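-- pv_equiv track=rewrite | github.com/Syuko4omi/textchecker | src/module_wordy/tautological_funcs.py | find_tautological_expression
-- ===== SOURCE A (Python) =====
-- def find_tautological_expression(
--     one_sentence: str, tautological_expression_dict: dict[str, list[str]]
-- ) -> list[str]:
--     # 文章中から重複表現を抜き出す
--     tautological_parts = []
--     for key in tautological_expression_dict.keys():
--         if len(one_sentence.split(key)) > 1:  # 重複表現が文章の中にあった場合
--             splitted_parts = one_sentence.split(key)  # その重複表現を境界にして文章を分ける
--             for idx in range(len(splitted_parts)):  # 文中に登場する順序を保ったまま、重複表現を格納する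
--                 tautological_parts.extend(
--                     find_tautological_expression(
--                         splitted_parts[idx], tautological_expression_dict
--                     )
--                 )
--                 if idx != len(splitted_parts) - 1:
--                     tautological_parts.append(key)
--             break
--     return tautological_parts
-- ===== SOURCE B (Python) =====
-- def find_tautological_expression(
--     one_sentence: str, tautological_expression_dict: dict[str, list[str]]
-- ) -> list[str]:
--     # Iterative version: explicit stack of work items replaces the recursion.
--     result = []
--     stack = [("expand", one_sentence)]
--     while stack:
--         tag, val = stack.pop()
--         if tag == "emit":
--             result.append(val)
--         else:
--             for key in tautological_expression_dict.keys():
--                 parts = val.split(key)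
--                 if len(parts) > 1:
--                     items = []
--                     for i in range(len(parts)):
--                         items.append(("expand", parts[i]))
--                         if i != len(parts) - 1:
--                             items.append(("emit", key))
--                     stack.extend(reversed(items))
--                     break
--     return result
-- ===== Notes on version B (the rewrite author's own statement) =====
-- stated objective: alternative
-- what changed: B replaces A's recursion by an explicit stack machine: a worklist holds tagged items (sentences to expand, key tokens to emit), the stack is extended with the reversed interleaving of split parts and keys so popping reproduces A's in-order traversal, and a single while-loop drains it.
import Mathlib
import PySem

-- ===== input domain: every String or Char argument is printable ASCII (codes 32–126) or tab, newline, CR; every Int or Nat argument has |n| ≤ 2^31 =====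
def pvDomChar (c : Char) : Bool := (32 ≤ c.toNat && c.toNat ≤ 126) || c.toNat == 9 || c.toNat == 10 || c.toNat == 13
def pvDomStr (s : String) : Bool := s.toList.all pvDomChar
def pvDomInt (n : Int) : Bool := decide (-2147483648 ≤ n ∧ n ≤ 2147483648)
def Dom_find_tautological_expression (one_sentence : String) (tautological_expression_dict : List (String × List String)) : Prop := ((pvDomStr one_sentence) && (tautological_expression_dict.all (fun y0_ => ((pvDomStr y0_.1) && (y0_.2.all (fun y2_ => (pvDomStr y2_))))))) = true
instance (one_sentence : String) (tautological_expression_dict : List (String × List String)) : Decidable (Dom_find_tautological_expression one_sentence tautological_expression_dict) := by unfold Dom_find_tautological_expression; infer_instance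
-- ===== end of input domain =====

-- B replaces A's recursion by an explicit stack of work items (alternative decomposition, same values).

-- ===== PORT A =====
-- A's inner `for idx in range(len(splitted_parts))` loop (extend with the recursive
-- result, append the key between parts).
def pvAInner (recur : List Char → List String) (k : List Char)
    (parts : List (List Char)) : List String :=
  (PySem.List.pyRange 0 parts.length).foldl (fun acc idx =>
    let acc2 := acc ++ recur (PySem.List.pyGetD parts idx [])
    if idx ≠ (parts.length : Int) - 1 then acc2 ++ [String.ofList k] else acc2) []

-- A's `for key in ...keys()` loop with its `break` at the first splitting key.
def pvAKeys (recur : List Char → List String) (s : List Char) : List (List Char) → List String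
  | [] => []
  | k :: rest =>
    if 1 < (PySem.Chars.splitOn s k).length then
      pvAInner recur k (PySem.Chars.splitOn s k)
    else pvAKeys recur s rest

-- A's recursion, made total by fuel; fuel |s|+1 suffices because every recursive
-- call is on a strict substring (proved below for the equivalence).
def pvAFuel (keys : List (List Char)) : Nat → List Char → List String
  | 0, _ => []
  | f + 1, s => pvAKeys (fun p => pvAFuel keys f p) s keys

def find_tautological_expression (one_sentence : String) (tautological_expression_dict : List (String × List String)) : List String :=
  let keys := PySem.Set.ofList (tautological_expression_dict.map (fun p => p.1.toList))
  pvAFuel keys (one_sentence.toList.length + 1) one_sentence.toList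

-- ===== PORT B =====
-- a work item of B's stack: ("expand", sentence) or ("emit", key)
inductive PvItem : Type
  | expand : List Char → PvItem
  | emit : List Char → PvItem
deriving DecidableEq, Repr

-- B's `items` list built by `for i in range(len(parts))`.
def pvBItems (k : List Char) (parts : List (List Char)) : List PvItem :=
  (PySem.List.pyRange 0 parts.length).foldl (fun items i =>
    let items2 := items ++ [PvItem.expand (PySem.List.pyGetD parts i [])]
    if i ≠ (parts.length : Int) - 1 then items2 ++ [PvItem.emit k] else items2) []

-- B's `for key in ...: parts = val.split(key); if len(parts) > 1: ... break` scan.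
def pvBScan (val : List Char) : List (List Char) → Option (List Char × List (List Char))
  | [] => none
  | k :: rest =>
    let parts := PySem.Chars.splitOn val k
    if 1 < parts.length then some (k, parts) else pvBScan val rest

-- B's `while stack:` loop, made total by fuel; the stack is kept top-first, so
-- Python's `stack.pop()` is the head and `stack.extend(reversed(items))` is `items ++ stack`.
def pvBRun (keys : List (List Char)) : Nat → List PvItem → List String → List String
  | 0, _, res => res
  | _ + 1, [], res => res
  | f + 1, PvItem.emit k :: stack, res => pvBRun keys f stack (res ++ [String.ofList k])
  | f + 1, PvItem.expand val :: stack, res =>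
    match pvBScan val keys with
    | none => pvBRun keys f stack res
    | some (k, parts) => pvBRun keys f (pvBItems k parts ++ stack) res

def find_tautological_expression_alt (one_sentence : String) (tautological_expression_dict : List (String × List String)) : List String :=
  let keys := PySem.Set.ofList (tautological_expression_dict.map (fun p => p.1.toList))
  pvBRun keys (3 ^ (one_sentence.toList.length + 1) + 1) [PvItem.expand one_sentence.toList] []

-- ===== PRECONDITION & SPEC =====
-- Pre_ excludes dictionaries containing the empty-string key: Python's str.split('')
-- raises ValueError, and A always reaches that key (at top level or in a leaf of its
-- recursion), so A never returns a value on those inputs.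
def Pre_find_tautological_expression (one_sentence : String) (tautological_expression_dict : List (String × List String)) : Prop :=
  ∀ p ∈ tautological_expression_dict, p.1 ≠ ""
instance (one_sentence : String) (tautological_expression_dict : List (String × List String)) : Decidable (Pre_find_tautological_expression one_sentence tautological_expression_dict) := by unfold Pre_find_tautological_expression; infer_instance

def pvWitness_find_tautological_expression : String × (List (String × List String)) :=
  ("aab", [("a", ["x"]), ("b", [])])

def Spec_find_tautological_expression (one_sentence : String) (tautological_expression_dict : List (String × List String)) (out : List String) : Prop := out = find_tautological_expression_alt one_sentence tautological_expression_dict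
instance (one_sentence : String) (tautological_expression_dict : List (String × List String)) (out : List String) : Decidable (Spec_find_tautological_expression one_sentence tautological_expression_dict out) := by unfold Spec_find_tautological_expression; infer_instance

-- ===== CLAIM (what is proved, stated in full; the proofs are below) =====
def Claim_equal_find_tautological_expression : Prop := ∀ (one_sentence : String) (tautological_expression_dict : List (String × List String)), Dom_find_tautological_expression one_sentence tautological_expression_dict → Pre_find_tautological_expression one_sentence tautological_expression_dict → Spec_find_tautological_expression one_sentence tautological_expression_dict (find_tautological_expression one_sentence tautological_expression_dict)

-- ===== LEMMAS AND PROOFS =====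

theorem pvGoSpec (sep : List Char) (hsep : sep ≠ []) :
    ∀ (fuel : Nat) (l cur : List Char) (acc : List (List Char)), l.length < fuel →
    ∃ rest, PySem.Chars.splitOn.go sep fuel l cur acc = acc.reverse ++ rest ∧ rest ≠ [] ∧
      PySem.Chars.join sep rest = cur.reverse ++ l := by
  intro fuel
  induction fuel with
  | zero => intro l cur acc h; omega
  | succ f ih =>
    intro l cur acc h
    cases l with
    | nil =>
      refine ⟨[cur.reverse], ?_, by simp, by simp [PySem.Chars.join_singleton]⟩
      simp [PySem.Chars.splitOn.go]
    | cons c t =>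
      by_cases hpre : sep.isPrefixOf (c :: t) = true
      · obtain ⟨l', hl'⟩ : sep <+: (c :: t) := List.isPrefixOf_iff_prefix.mp hpre
        have hslen : 1 ≤ sep.length := by
          cases sep with | nil => exact absurd rfl hsep | cons a b => simp
        have hdrop : (c :: t).drop sep.length = l' := by
          rw [← hl', List.drop_append_of_le_length (le_refl _)]
          simp
        have hlen' : l'.length < f := by
          have hl2 := congrArg List.length hl'
          simp at hl2 h
          omega
        obtain ⟨rest', hgo, hne, hjoin⟩ := ih l' [] (cur.reverse :: acc) hlen'
        refine ⟨cur.reverse :: rest', ?_, by simp, ?_⟩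
        · rw [show PySem.Chars.splitOn.go sep (f+1) (c :: t) cur acc
              = PySem.Chars.splitOn.go sep f ((c :: t).drop sep.length) [] (cur.reverse :: acc) by
            simp [PySem.Chars.splitOn.go, hpre]]
          rw [hdrop, hgo]
          simp
        · cases rest' with
          | nil => exact absurd rfl hne
          | cons r rs =>
            rw [PySem.Chars.join_cons_cons]
            rw [hjoin]
            simp [← hl']
      · have hlen' : t.length < f := by simp at h; omega
        obtain ⟨rest, hgo, hne, hjoin⟩ := ih t (c :: cur) acc hlen'
        refine ⟨rest, ?_, hne, ?_⟩
        · rw [show PySem.Chars.splitOn.go sep (f+1) (c :: t) cur acc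
              = PySem.Chars.splitOn.go sep f t (c :: cur) acc by
            simp [PySem.Chars.splitOn.go, hpre]]
          exact hgo
        · rw [hjoin]; simp

theorem pvSplitOnJoin (s sep : List Char) (hsep : sep ≠ []) :
    PySem.Chars.splitOn s sep ≠ [] ∧
      PySem.Chars.join sep (PySem.Chars.splitOn s sep) = s := by
  obtain ⟨rest, hgo, hne, hjoin⟩ := pvGoSpec sep hsep (s.length + 1) s [] [] (by omega)
  rw [PySem.Chars.splitOn]
  rw [hgo]
  simpa using ⟨hne, hjoin⟩

theorem pvJoinLength (sep : List Char) :
    ∀ L : List (List Char), L ≠ [] →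
      (PySem.Chars.join sep L).length = (L.map List.length).sum + (L.length - 1) * sep.length := by
  intro L
  induction L with
  | nil => simp
  | cons a t ih =>
    intro _
    cases t with
    | nil => simp [PySem.Chars.join_singleton]
    | cons b t' =>
      rw [PySem.Chars.join_cons_cons, List.length_append, List.length_append, ih (by simp)]
      simp only [List.length_cons, List.map_cons, List.sum_cons, Nat.add_sub_cancel]
      ring

theorem pvPartsSum (s sep : List Char) (hsep : sep ≠ []) :
    ((PySem.Chars.splitOn s sep).map List.length).sum
      + ((PySem.Chars.splitOn s sep).length - 1) * sep.length = s.length := by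
  obtain ⟨hne, hjoin⟩ := pvSplitOnJoin s sep hsep
  have := pvJoinLength sep _ hne
  rw [hjoin] at this
  omega

theorem pvPartLt (s sep p : List Char) (hsep : sep ≠ [])
    (h2 : 1 < (PySem.Chars.splitOn s sep).length)
    (hp : p ∈ PySem.Chars.splitOn s sep) : p.length < s.length := by
  have hsum := pvPartsSum s sep hsep
  have hple : p.length ≤ ((PySem.Chars.splitOn s sep).map List.length).sum :=
    List.single_le_sum (by simp) _ (List.mem_map_of_mem hp)
  have hslen : 1 ≤ sep.length := by
    cases sep with | nil => exact absurd rfl hsep | cons a b => simp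
  have : 1 ≤ ((PySem.Chars.splitOn s sep).length - 1) * sep.length :=
    Nat.one_le_iff_ne_zero.mpr (Nat.mul_ne_zero (by omega) (by omega))
  omega

theorem pvPow3Aux (x y : Nat) (hx : 1 ≤ x) (hy : 1 ≤ y) :
    3 ^ x + 3 ^ y + 3 ≤ 3 ^ (x + y) := by
  have hx3 : 3 ≤ 3 ^ x := by calc (3:Nat) = 3 ^ 1 := by norm_num
                                 _ ≤ 3 ^ x := Nat.pow_le_pow_right (by norm_num) hx
  have hy3 : 3 ≤ 3 ^ y := by calc (3:Nat) = 3 ^ 1 := by norm_num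
                                 _ ≤ 3 ^ y := Nat.pow_le_pow_right (by norm_num) hy
  rw [pow_add]
  nlinarith

theorem pvPow3 : ∀ L : List Nat, 2 ≤ L.length →
    (L.map (fun a => 3 ^ (a + 1))).sum + L.length ≤ 3 ^ (L.sum + L.length) := by
  intro L
  induction L with
  | nil => simp
  | cons a t ih =>
    intro h
    cases t with
    | nil => simp at h
    | cons b t' =>
      cases t' with
      | nil =>
        simp only [List.map_cons, List.map_nil, List.sum_cons, List.sum_nil, List.length_cons,
          List.length_nil]
        have := pvPow3Aux (a + 1) (b + 1) (by omega) (by omega)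
        calc 3 ^ (a+1) + (3 ^ (b+1) + 0) + (0 + 1 + 1)
            = 3 ^ (a+1) + 3 ^ (b+1) + 2 := by ring
          _ ≤ 3 ^ ((a+1) + (b+1)) := by omega
          _ = 3 ^ (a + (b + 0) + (0 + 1 + 1)) := by congr 1; omega
      | cons c t'' =>
        have ht := ih (by simp)
        simp only [List.map_cons, List.sum_cons, List.length_cons] at *
        have haux := pvPow3Aux (a + 1) ((b + (c + t''.sum)) + (t''.length + 1 + 1)) (by omega) (by omega)
        have : 3 ^ (a + 1) + 3 ^ (b + (c + t''.sum) + (t''.length + 1 + 1)) + 3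
            ≤ 3 ^ (a + (b + (c + t''.sum)) + (t''.length + 1 + 1 + 1)) := by
          calc 3 ^ (a + 1) + 3 ^ (b + (c + t''.sum) + (t''.length + 1 + 1)) + 3
              ≤ 3 ^ ((a + 1) + ((b + (c + t''.sum)) + (t''.length + 1 + 1))) := haux
            _ = 3 ^ (a + (b + (c + t''.sum)) + (t''.length + 1 + 1 + 1)) := by ring_nf
        omega

theorem pvRangeEmpty (a : Int) : PySem.List.pyRange a a = [] := by
  simp [PySem.List.pyRange]

theorem pvRangeSingle (m : Int) : PySem.List.pyRange m (m + 1) = [m] := by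
  rw [PySem.List.pyRange_one_cons (by omega)]
  rw [pvRangeEmpty]

theorem pvRangeSnoc (m : Nat) :
    PySem.List.pyRange 0 ((m : Int) + 1) = PySem.List.pyRange 0 (m : Int) ++ [(m : Int)] := by
  rw [PySem.List.pyRange_one_append 0 (m : Int) ((m : Int) + 1) (by omega) (by omega)]
  rw [pvRangeSingle]

theorem pvShape {α β : Type} (d : α) (parts front : List α) (lastp : α)
    (hp : parts = front ++ [lastp]) (fE : α → List β) (fK : List β) (init : List β) :
    (PySem.List.pyRange 0 parts.length).foldl (fun acc i =>
        let acc2 := acc ++ fE (PySem.List.pyGetD parts i d)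
        if i ≠ (parts.length : Int) - 1 then acc2 ++ fK else acc2) init
      = init ++ front.flatMap (fun p => fE p ++ fK) ++ fE lastp := by
  subst hp
  have pref : ∀ m : Nat, m ≤ front.length →
      (PySem.List.pyRange 0 (m : Int)).foldl (fun acc i =>
        let acc2 := acc ++ fE (PySem.List.pyGetD (front ++ [lastp]) i d)
        if i ≠ ((front ++ [lastp]).length : Int) - 1 then acc2 ++ fK else acc2) init
      = init ++ (front.take m).flatMap (fun p => fE p ++ fK) := by
    intro m
    induction m with
    | zero => intro _; simp
    | succ m ih =>
      intro hm
      have hmf : m < front.length := by omega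
      have hrange : PySem.List.pyRange 0 (((m + 1 : Nat)) : Int)
          = PySem.List.pyRange 0 (m : Int) ++ [(m : Int)] := by
        push_cast
        exact pvRangeSnoc m
      rw [hrange, List.foldl_append, ih (by omega)]
      have hget : PySem.List.pyGetD (front ++ [lastp]) (m : Int) d = front[m] := by
        rw [PySem.List.pyGetD_eq_getElem _ _ (by omega) (by simp; omega)]
        simp [List.getElem_append_left hmf]
      simp only [List.foldl_cons, List.foldl_nil, hget]
      split_ifs with hc
      · rw [List.take_succ_eq_append_getElem hmf, List.flatMap_append]
        simp
      · exfalso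
        apply hc
        simp only [List.length_append, List.length_cons, List.length_nil]
        push_cast
        omega
  have hsplit : PySem.List.pyRange 0 (((front ++ [lastp]).length : Nat) : Int)
      = PySem.List.pyRange 0 (front.length : Int) ++ [(front.length : Int)] := by
    rw [show (((front ++ [lastp]).length : Nat) : Int) = (front.length : Int) + 1 by simp]
    exact pvRangeSnoc front.length
  rw [hsplit, List.foldl_append, pref front.length (le_refl _)]
  have hget : PySem.List.pyGetD (front ++ [lastp]) (front.length : Int) d = lastp := by
    rw [PySem.List.pyGetD_eq_getElem _ _ (by omega) (by simp)]
    simp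
  simp only [List.foldl_cons, List.foldl_nil, hget]
  split_ifs with hc
  · exfalso
    apply hc
    simp only [List.length_append, List.length_cons, List.length_nil]
    push_cast
    omega
  · simp [List.take_length, List.append_assoc]

theorem pvFlatMapCongr {α β : Type} (l : List α) (f g : α → List β)
    (h : ∀ x ∈ l, f x = g x) : l.flatMap f = l.flatMap g := by
  induction l with
  | nil => simp
  | cons a t ih =>
    simp only [List.flatMap_cons]
    rw [h a (by simp), ih (fun x hx => h x (by simp [hx]))]

-- cost of a stack item / stack: 3^(|s|+1) for a sentence, 1 for a key token
def pvCost : PvItem → Nat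
  | .emit _ => 1
  | .expand s => 3 ^ (s.length + 1)

def pvCostL (st : List PvItem) : Nat := (st.map pvCost).sum

-- the value a stack item contributes to the output
def pvEval (keys : List (List Char)) : PvItem → List String
  | .emit k => [String.ofList k]
  | .expand s => pvAFuel keys (s.length + 1) s

theorem pvBScanNone (val : List Char) (r : List Char → List String) :
    ∀ ks : List (List Char), pvBScan val ks = none → pvAKeys r val ks = [] := by
  intro ks
  induction ks with
  | nil => intro _; simp [pvAKeys]
  | cons k rest ih =>
    intro h
    simp only [pvBScan] at h
    simp only [pvAKeys]
    split_ifs with hk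
    · simp [hk] at h
    · exact ih (by simpa [hk] using h)

theorem pvBScanSome (val k : List Char) (parts : List (List Char)) :
    ∀ ks : List (List Char), pvBScan val ks = some (k, parts) →
      k ∈ ks ∧ parts = PySem.Chars.splitOn val k ∧ 1 < parts.length ∧
        ∀ r, pvAKeys r val ks = pvAInner r k parts := by
  intro ks
  induction ks with
  | nil => intro h; simp [pvBScan] at h
  | cons k0 rest ih =>
    intro h
    simp only [pvBScan] at h
    by_cases hk : 1 < (PySem.Chars.splitOn val k0).length
    · simp only [if_pos hk, Option.some.injEq, Prod.mk.injEq] at h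
      obtain ⟨rfl, rfl⟩ := h
      refine ⟨by simp, rfl, hk, ?_⟩
      intro r
      simp [pvAKeys, hk]
    · simp only [if_neg hk] at h
      obtain ⟨hmem, hp, hl, hkeq⟩ := ih h
      exact ⟨by simp [hmem], hp, hl, fun r => by simp [pvAKeys, hk, hkeq r]⟩

theorem pvAInnerCongr (k : List Char) (parts : List (List Char)) (hne : parts ≠ [])
    (r1 r2 : List Char → List String) (h : ∀ p ∈ parts, r1 p = r2 p) :
    pvAInner r1 k parts = pvAInner r2 k parts := by
  obtain ⟨front, lastp, hfl⟩ := (List.eq_nil_or_concat parts).resolve_left hne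
  rw [List.concat_eq_append] at hfl
  unfold pvAInner
  rw [pvShape [] parts front lastp hfl r1 [String.ofList k] [],
    pvShape [] parts front lastp hfl r2 [String.ofList k] []]
  rw [h lastp (by simp [hfl]),
    pvFlatMapCongr front _ _ (fun p hp => by rw [h p (by simp [hfl, hp])])]

theorem pvAKeysCongr (s : List Char) (r1 r2 : List Char → List String)
    (h : ∀ p : List Char, p.length < s.length → r1 p = r2 p) :
    ∀ ks : List (List Char), (∀ k ∈ ks, k ≠ []) → pvAKeys r1 s ks = pvAKeys r2 s ks := by
  intro ks
  induction ks with
  | nil => intro _; simp [pvAKeys]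
  | cons k rest ih =>
    intro hkeys
    simp only [pvAKeys]
    split_ifs with hk
    · apply pvAInnerCongr _ _ (by intro h0; rw [h0] at hk; simp at hk)
      intro p hp
      exact h p (pvPartLt s k p (hkeys k (by simp)) hk hp)
    · exact ih (fun k2 hk2 => hkeys k2 (by simp [hk2]))

-- fuel irrelevance for A's port: any fuel above the string length gives the same value
theorem pvAFuelEq (keys : List (List Char)) (hkeys : ∀ k ∈ keys, k ≠ []) :
    ∀ (m : Nat) (s : List Char), s.length ≤ m → ∀ f : Nat, s.length < f →
      pvAFuel keys f s = pvAFuel keys (s.length + 1) s := by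
  intro m
  induction m with
  | zero =>
    intro s hs f hf
    cases f with
    | zero => omega
    | succ f' =>
      simp only [pvAFuel]
      exact pvAKeysCongr s _ _ (fun p hp => by omega) keys hkeys
  | succ m ih =>
    intro s hs f hf
    cases f with
    | zero => omega
    | succ f' =>
      simp only [pvAFuel]
      apply pvAKeysCongr s _ _ ?_ keys hkeys
      intro p hp
      rw [ih p (by omega) f' (by omega), ih p (by omega) s.length (by omega)]

theorem pvBItemsEq (k : List Char) (parts front : List (List Char)) (lastp : List Char)
    (hfl : parts = front ++ [lastp]) :
    pvBItems k parts
      = front.flatMap (fun p => [PvItem.expand p, PvItem.emit k]) ++ [PvItem.expand lastp] := by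
  unfold pvBItems
  rw [pvShape [] parts front lastp hfl (fun p => [PvItem.expand p]) [PvItem.emit k] []]
  simp

theorem pvCostFlat (k : List Char) :
    ∀ fr : List (List Char),
      ((fr.flatMap (fun p => [PvItem.expand p, PvItem.emit k])).map pvCost).sum
        = ((fr.map List.length).map (fun a => 3 ^ (a + 1))).sum + fr.length := by
  intro fr
  induction fr with
  | nil => simp
  | cons a t ih =>
    simp [pvCost, ih]
    omega

theorem pvCostItems (k : List Char) (parts front : List (List Char)) (lastp : List Char)
    (hfl : parts = front ++ [lastp]) :
    pvCostL (pvBItems k parts)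
      = ((parts.map List.length).map (fun a => 3 ^ (a + 1))).sum + (parts.length - 1) := by
  rw [pvBItemsEq k parts front lastp hfl]
  subst hfl
  simp only [pvCostL, List.map_append, List.sum_append, List.length_append, List.length_cons,
    List.length_nil, List.map_cons, List.map_nil, List.sum_cons, List.sum_nil, pvCost,
    pvCostFlat k front]
  omega

theorem pvCostItemsLt (val k : List Char) (hk : k ≠ [])
    (h2 : 1 < (PySem.Chars.splitOn val k).length)
    (front : List (List Char)) (lastp : List Char)
    (hfl : PySem.Chars.splitOn val k = front ++ [lastp]) :
    pvCostL (pvBItems k (PySem.Chars.splitOn val k)) + 1 ≤ 3 ^ (val.length + 1) := by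
  rw [pvCostItems k _ front lastp hfl]
  have hlenL : ((PySem.Chars.splitOn val k).map List.length).length
      = (PySem.Chars.splitOn val k).length := by simp
  have hpow := pvPow3 ((PySem.Chars.splitOn val k).map List.length) (by omega)
  have hsum := pvPartsSum val k hk
  have hmul : (PySem.Chars.splitOn val k).length - 1
      ≤ ((PySem.Chars.splitOn val k).length - 1) * k.length :=
    Nat.le_mul_of_pos_right _ (by cases k with
      | nil => exact absurd rfl hk
      | cons a b => simp)
  have hbound : ((PySem.Chars.splitOn val k).map List.length).sum
      + ((PySem.Chars.splitOn val k).map List.length).length ≤ val.length + 1 := by omega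
  have hmono := Nat.pow_le_pow_right (show 1 ≤ 3 by norm_num) hbound
  omega

theorem pvEvalFlat (keys : List (List Char)) (k : List Char) :
    ∀ fr : List (List Char),
      (fr.flatMap (fun p => [PvItem.expand p, PvItem.emit k])).flatMap (pvEval keys)
        = fr.flatMap (fun p => pvEval keys (PvItem.expand p) ++ [String.ofList k]) := by
  intro fr
  induction fr with
  | nil => simp
  | cons a t ih =>
    simp only [List.flatMap_cons, List.flatMap_append, ih]
    simp [pvEval]

-- B's machine, run with enough fuel, returns the in-order evaluation of its stack
theorem pvBRunSpec (keys : List (List Char)) (hkeys : ∀ k ∈ keys, k ≠ []) :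
    ∀ (f : Nat) (stack : List PvItem) (res : List String), pvCostL stack < f →
      pvBRun keys f stack res = res ++ stack.flatMap (pvEval keys) := by
  intro f
  induction f with
  | zero => intro stack res h; omega
  | succ f ih =>
    intro stack res h
    match stack with
    | [] => simp [pvBRun]
    | PvItem.emit k :: st =>
      simp only [pvBRun]
      rw [ih st _ (by simp [pvCostL, pvCost] at h ⊢; omega)]
      simp [pvEval]
    | PvItem.expand val :: st =>
      have hcostval : pvCostL (PvItem.expand val :: st) = 3 ^ (val.length + 1) + pvCostL st := by
        simp [pvCostL, pvCost]
      cases hscan : pvBScan val keys with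
      | none =>
        simp only [pvBRun, hscan]
        rw [ih st res (by rw [hcostval] at h; have : 1 ≤ 3 ^ (val.length + 1) := Nat.one_le_pow _ _ (by norm_num); omega)]
        have hval : pvEval keys (PvItem.expand val) = [] := by
          show pvAFuel keys (val.length + 1) val = []
          simp only [pvAFuel]
          exact pvBScanNone val _ keys hscan
        simp [hval]
      | some kp =>
        obtain ⟨k, parts⟩ := kp
        obtain ⟨hkmem, hparts, hlen2, haka⟩ := pvBScanSome val k parts keys hscan
        have hkne : k ≠ [] := hkeys k hkmem
        have hpartne : parts ≠ [] := by intro h0; rw [h0] at hlen2; simp at hlen2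
        obtain ⟨front, lastp, hfl⟩ := (List.eq_nil_or_concat parts).resolve_left hpartne
        rw [List.concat_eq_append] at hfl
        have hcostit : pvCostL (pvBItems k parts) + 1 ≤ 3 ^ (val.length + 1) := by
          rw [hparts] at hfl ⊢
          exact pvCostItemsLt val k hkne (hparts ▸ hlen2) front lastp hfl
        simp only [pvBRun, hscan]
        rw [ih (pvBItems k parts ++ st) res (by
          have : pvCostL (pvBItems k parts ++ st) = pvCostL (pvBItems k parts) + pvCostL st := by
            simp [pvCostL]
          rw [hcostval] at h
          omega)]
        congr 1
        rw [List.flatMap_append, List.flatMap_cons]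
        congr 1
        -- flatMap eval of the pushed items = the evaluation of the popped sentence
        rw [pvBItemsEq k parts front lastp hfl, List.flatMap_append]
        have hplt : ∀ p ∈ parts, p.length < val.length := by
          intro p hp
          exact pvPartLt val k p hkne (hparts ▸ hlen2) (hparts ▸ hp)
        show _ = pvAFuel keys (val.length + 1) val
        simp only [pvAFuel]
        rw [haka (fun p => pvAFuel keys val.length p)]
        unfold pvAInner
        rw [pvShape [] parts front lastp hfl (fun p => pvAFuel keys val.length p)
          [String.ofList k] []]
        simp only [List.nil_append]
        rw [pvEvalFlat keys k front]
        have hlast : lastp.length < val.length := hplt lastp (by simp [hfl])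
        have hEvalEq : ∀ p ∈ parts, pvEval keys (PvItem.expand p) = pvAFuel keys val.length p := by
          intro p hp
          show pvAFuel keys (p.length + 1) p = pvAFuel keys val.length p
          exact (pvAFuelEq keys hkeys val.length p (le_of_lt (hplt p hp)) val.length (hplt p hp)).symm
        rw [pvFlatMapCongr front _ _ (fun p hp => by rw [hEvalEq p (by simp [hfl, hp])])]
        simp only [List.flatMap_cons, List.flatMap_nil, List.append_nil, pvEval]
        rw [pvAFuelEq keys hkeys val.length lastp (le_of_lt hlast) val.length hlast]

-- ===== VERDICT (by name: the statement is the Claim_ definition above) =====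
theorem find_tautological_expression_spec : Claim_equal_find_tautological_expression := by
  intro s dict hdom hpre
  unfold Spec_find_tautological_expression
  unfold find_tautological_expression find_tautological_expression_alt
  simp only []
  set keys := PySem.Set.ofList (dict.map (fun p => p.1.toList)) with hkdef
  have hkeys : ∀ k ∈ keys, k ≠ [] := by
    intro k hk
    rw [hkdef, PySem.Set.mem_ofList] at hk
    obtain ⟨p, hp, rfl⟩ := List.mem_map.mp hk
    intro h0
    exact hpre p hp (String.toList_eq_nil_iff.mp h0)
  rw [pvBRunSpec keys hkeys _ _ _ (by
    have : pvCostL [PvItem.expand s.toList] = 3 ^ (s.toList.length + 1) := by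
      simp [pvCostL, pvCost]
    omega)]
  simp [pvEval]
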